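-- pv_equiv track=rewrite | github.com/ravijar/telegram-bot | google_sheet.py | group_by_handle_by
-- ===== SOURCE A (Python) =====
-- from typing import List, Dict
--
-- def group_by_handle_by(data_list: List[Dict[str, str]]) -> Dict[str, List[Dict[str, str]]]:
--     """
--     Groups data by the 'handleBy' field (lowercased),
--     removing 'handleBy' from each row dictionary.
--     """
--     grouped = {}
--     for row in data_list:
--         key = row.get('handleBy', '').strip().lower()
--         if not key:
--             continue
--
--         row_copy = {k: v for k, v in row.items() if k != 'handleBy'}
--         grouped.setdefault(key, []).append(row_copy)
--
--     return grouped
-- ===== SOURCE B (Python) =====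
-- def group_by_handle_by(data_list):
--     """Two-pass regrouping: collect the distinct non-empty keys in first-occurrence
--     order, then build each group by one filtering pass per key."""
--     def key_of(row):
--         return row.get('handleBy', '').strip().lower()
--
--     keys = []
--     for row in data_list:
--         k = key_of(row)
--         if k and k not in keys:
--             keys.append(k)
--
--     return {k: [{a: v for a, v in row.items() if a != 'handleBy'}
--                 for row in data_list if key_of(row) == k]
--             for k in keys}
-- ===== Notes on version B (the rewrite author's own statement) =====
-- stated objective: alternative
-- what changed: Replaces one-pass hash bucketing (dict.setdefault(...).append) by a two-pass scheme: first dedup the non-empty lowercased keys in first-occurrence order, then build each group with a separate filtering pass over the whole list.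
import Mathlib
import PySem

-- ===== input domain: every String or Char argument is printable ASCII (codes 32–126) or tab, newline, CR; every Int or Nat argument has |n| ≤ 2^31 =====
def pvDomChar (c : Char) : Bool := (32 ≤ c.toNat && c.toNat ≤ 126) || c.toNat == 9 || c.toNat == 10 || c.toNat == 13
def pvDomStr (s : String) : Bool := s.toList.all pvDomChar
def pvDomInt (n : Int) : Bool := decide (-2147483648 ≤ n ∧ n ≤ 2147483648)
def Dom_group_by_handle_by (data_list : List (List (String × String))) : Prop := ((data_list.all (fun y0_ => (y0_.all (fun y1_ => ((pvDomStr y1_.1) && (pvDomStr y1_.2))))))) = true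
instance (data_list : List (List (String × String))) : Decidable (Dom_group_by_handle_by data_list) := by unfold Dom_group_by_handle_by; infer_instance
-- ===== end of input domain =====

-- B replaces A's one-pass dict.setdefault bucketing by a two-pass scheme (dedup the
-- non-empty keys in first-occurrence order, then one filtering pass per key); same
-- result, alternative structure (not faster).


-- ===== PORT A =====
-- row.get('handleBy','').strip().lower()  (row is a Python dict: first build the dict)
def pvKeyOf (row : List (String × String)) : String :=
  PySem.Str.lower (PySem.Str.strip ((PySem.Dict.ofList row).getD "handleBy" ""))

-- {k: v for k, v in row.items() if k != 'handleBy'} as an association list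
def pvRowCopy (row : List (String × String)) : List (String × String) :=
  (PySem.Dict.ofList row).items.filter (fun p => p.1 != "handleBy")

def group_by_handle_by (data_list : List (List (String × String))) : List (String × List (List (String × String))) :=
  (data_list.foldl (fun grouped row =>
      let key := pvKeyOf row
      if key = "" then grouped
      else grouped.modify key [] (fun g => g ++ [pvRowCopy row]))
    PySem.Dict.empty).items

-- ===== PORT B =====
def group_by_handle_by_alt (data_list : List (List (String × String))) : List (String × List (List (String × String))) :=
  let keys := data_list.foldl (fun ks row =>
      let k := pvKeyOf row
      if k ≠ "" ∧ k ∉ ks then ks ++ [k] else ks) []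
  keys.map (fun k => (k, (data_list.filter (fun row => pvKeyOf row == k)).map pvRowCopy))

-- ===== PRECONDITION & SPEC =====
def Spec_group_by_handle_by (data_list : List (List (String × String))) (out : List (String × List (List (String × String)))) : Prop := out = group_by_handle_by_alt data_list
instance (data_list : List (List (String × String))) (out : List (String × List (List (String × String)))) : Decidable (Spec_group_by_handle_by data_list out) := by unfold Spec_group_by_handle_by; infer_instance

-- ===== CLAIM (what is proved, stated in full; the proofs are below) =====
def Claim_equal_group_by_handle_by : Prop := ∀ (data_list : List (List (String × String))), Dom_group_by_handle_by data_list → Spec_group_by_handle_by data_list (group_by_handle_by data_list)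

-- ===== LEMMAS AND PROOFS =====

-- A's loop with its 'continue' is the plain modify-loop over the rows whose key is non-empty.
theorem foldA_eq_filter (l : List (List (String × String))) (d : PySem.Dict String (List (List (String × String)))) :
    l.foldl (fun grouped row =>
        let key := pvKeyOf row
        if key = "" then grouped
        else grouped.modify key [] (fun g => g ++ [pvRowCopy row])) d
      = (l.filter (fun row => pvKeyOf row != "")).foldl
          (fun grouped row => grouped.modify (pvKeyOf row) [] (fun g => g ++ [pvRowCopy row])) d := by
  induction l generalizing d with
  | nil => simp only [List.foldl_nil, List.filter_nil]
  | cons r t ih =>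
    simp only [List.foldl_cons, List.filter_cons]
    by_cases h : pvKeyOf r = ""
    · rw [if_pos h, if_neg (by simp [h])]
      exact ih d
    · rw [if_neg h, if_pos (by simp [h])]
      simp only [List.foldl_cons]
      exact ih _

-- B's key-collecting loop is Set.update with the non-empty keys.
theorem foldB_eq_update (l : List (List (String × String))) (ks : List String) :
    l.foldl (fun ks row =>
        let k := pvKeyOf row
        if k ≠ "" ∧ k ∉ ks then ks ++ [k] else ks) ks
      = PySem.Set.update ks ((l.filter (fun row => pvKeyOf row != "")).map pvKeyOf) := by
  induction l generalizing ks with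
  | nil => simp only [List.foldl_nil, List.filter_nil, PySem.Set.update, List.map_nil]
  | cons r t ih =>
    simp only [List.foldl_cons, List.filter_cons]
    by_cases h : pvKeyOf r = ""
    · rw [if_neg (by simp [h]), if_neg (by simp [h])]
      exact ih ks
    · have hadd : (if pvKeyOf r ≠ "" ∧ pvKeyOf r ∉ ks then ks ++ [pvKeyOf r] else ks)
          = PySem.Set.add ks (pvKeyOf r) := by
        by_cases hm : pvKeyOf r ∈ ks
        · rw [if_neg (by simp [hm])]
          simp [PySem.Set.add, PySem.Set.contains, hm]
        · rw [if_pos ⟨h, hm⟩]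
          simp [PySem.Set.add, PySem.Set.contains, hm]
      rw [hadd, if_pos (by simp [h]), List.map_cons, ih]
      simp only [PySem.Set.update, List.foldl_cons]

theorem filter_key_eq (data_list : List (List (String × String))) (k : String) (hk : k ≠ "") :
    (data_list.filter (fun row => pvKeyOf row != "")).filter (fun row => pvKeyOf row == k)
      = data_list.filter (fun row => pvKeyOf row == k) := by
  rw [List.filter_filter]
  apply List.filter_congr
  intro row _
  by_cases h : pvKeyOf row = k
  · simp [h, hk]
  · simp [h]

-- ===== VERDICT (by name: the statement is the Claim_ definition above) =====
theorem group_by_handle_by_spec : Claim_equal_group_by_handle_by := by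
  intro data_list _
  unfold Spec_group_by_handle_by group_by_handle_by group_by_handle_by_alt
  rw [foldA_eq_filter, foldB_eq_update]
  set m := data_list.filter (fun row => pvKeyOf row != "") with hm
  have hkeys : (m.foldl (fun grouped row => grouped.modify (pvKeyOf row) [] (fun g => g ++ [pvRowCopy row]))
      (PySem.Dict.empty : PySem.Dict String (List (List (String × String))))).keys
      = PySem.Set.update [] (m.map pvKeyOf) := by
    exact PySem.Dict.keys_foldl_modify_key m pvKeyOf [] (fun _ row g => g ++ [pvRowCopy row]) _
  have hnodup : (m.foldl (fun grouped row => grouped.modify (pvKeyOf row) [] (fun g => g ++ [pvRowCopy row]))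
      (PySem.Dict.empty : PySem.Dict String (List (List (String × String))))).keys.Nodup := by
    apply PySem.Dict.nodup_keys_foldl_modify_key m pvKeyOf [] (fun _ row g => g ++ [pvRowCopy row])
    simp [PySem.Dict.keys, PySem.Dict.empty]
  rw [PySem.Dict.items_eq_map_keys _ hnodup []]
  rw [hkeys]
  apply List.map_congr_left
  intro k hkmem
  -- k is the key of some surviving row, hence non-empty
  have hk : k ≠ "" := by
    have : k ∈ m.map pvKeyOf := by
      have := hkmem
      simpa [PySem.Set.update, ← PySem.Set.ofList_eq_foldl, PySem.Set.mem_ofList] using this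
    obtain ⟨row, hrow, hkey⟩ := List.mem_map.mp this
    have h2 : (pvKeyOf row != "") = true := (List.mem_filter.mp hrow).2
    subst hkey
    simpa using h2
  congr 1
  -- the per-key contents of A's dict equal B's filtering pass
  have : m.foldl (fun grouped row => grouped.modify (pvKeyOf row) [] (fun g => g ++ [pvRowCopy row]))
      (PySem.Dict.empty : PySem.Dict String (List (List (String × String))))
      = (m.map (fun row => (pvKeyOf row, pvRowCopy row))).foldl
          (fun d p => d.modify p.1 [] (fun g => g ++ [p.2])) PySem.Dict.empty := by
    rw [List.foldl_map]
  rw [this, PySem.Dict.getD_foldl_modify_append]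
  rw [List.filter_map, List.map_map]
  simp only [Function.comp_def]
  rw [filter_key_eq data_list k hk]
  simp [PySem.Dict.getD_empty]
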